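-- pv_equiv track=rewrite | github.com/jonberge1337/codigo-hamming | prueba.py | es_par
-- ===== SOURCE A (Python) =====
-- def es_par(lista, salto):
--     """
--     nos dira si es par o no la posicion
--     dependiendo la cantidad del salto que le pasemos
--     >>> es_par(["?", "?", "1", "?", "0", "1", "0", "?", "1", "0", "1"], 1)
--     # lo convertiria en un array de 1 salto
--     # ["?", "1", "0", "0", "1", "1"]
--     # se suman todos los 1 y alfinal devuelve el booleno
--     False
--     """
--     lista_temporal = []
--     tamaino = len(lista)
--     lista = lista[salto-1:]
--
--     nsalto = salto * 2
--
--     while len(lista) > 0: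
--         # con esto extraemos los bit necesarios
--         lista_temporal += lista[:salto]
--         # con esto quitamos los bits extraidos mas su doble
--         lista = lista[nsalto:]
--
--     lista_temporal = lista_temporal[:tamaino]
--
--     suma = sum([1 for i in lista_temporal if i == "1"])
--
--     return suma % 2 == 0
-- ===== SOURCE B (Python) =====
-- def es_par(lista, salto):
--     inicio = salto - 1
--     periodo = 2 * salto
--     cuenta = 0
--     for i, x in enumerate(lista):
--         if i >= inicio and (i - inicio) % periodo < salto and x == "1":
--             cuenta += 1
--     return cuenta % 2 == 0
-- ===== Notes on version B (the rewrite author's own statement) =====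
-- stated objective: alternative
-- what changed: B replaces A's while-loop of repeated list slicing (extract a block, drop the block plus its double) by a single enumerate pass that selects positions arithmetically via (i-(salto-1)) % (2*salto) < salto and counts the ones.
-- outside the precondition, e.g. on es_par(['1'], 0): A does not finish within the time limit, B raises ZeroDivisionError
import Mathlib
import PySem

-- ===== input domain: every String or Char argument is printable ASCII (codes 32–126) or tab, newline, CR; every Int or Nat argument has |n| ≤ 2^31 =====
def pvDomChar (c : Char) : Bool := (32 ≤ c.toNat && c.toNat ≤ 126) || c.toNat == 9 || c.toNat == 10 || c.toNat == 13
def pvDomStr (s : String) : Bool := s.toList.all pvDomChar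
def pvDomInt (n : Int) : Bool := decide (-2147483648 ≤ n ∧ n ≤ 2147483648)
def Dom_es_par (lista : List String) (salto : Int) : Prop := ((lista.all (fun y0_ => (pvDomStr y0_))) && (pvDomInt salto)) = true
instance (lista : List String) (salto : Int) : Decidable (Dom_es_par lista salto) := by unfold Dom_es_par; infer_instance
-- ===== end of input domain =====

-- B replaces A's repeated list slicing by a single arithmetic index pass; proved equal whenever A terminates.

-- ===== PORT A =====
-- the while-loop of A; recursion is guarded by the list getting shorter (for salto ≥ 1 it always does)
def esParLoop (salto : Int) (lista acc : List String) : List String :=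
  if 0 < lista.length then
    let acc' := acc ++ PySem.List.slice lista none (some salto)
    let lista' := PySem.List.slice lista (some (salto * 2)) none
    if h : lista'.length < lista.length then esParLoop salto lista' acc' else acc'
  else acc
termination_by lista.length

def es_par (lista : List String) (salto : Int) : Bool :=
  let tamaino : Int := lista.length
  let lista1 := PySem.List.slice lista (some (salto - 1)) none
  let temporal := esParLoop salto lista1 []
  let temporal2 := PySem.List.slice temporal none (some tamaino)
  let suma : Int := ((temporal2.filter (fun i => i == "1")).map (fun _ => (1 : Int))).sum
  PySem.Int.mod suma 2 == 0

-- ===== PORT B =====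
-- the enumerate-loop of Source B as structural recursion carrying the running index j
def altCount (salto : Int) (j : Int) : List String → Int
  | [] => 0
  | x :: t =>
      (if salto - 1 ≤ j ∧ PySem.Int.mod (j - (salto - 1)) (2 * salto) < salto ∧ x = "1"
       then (1 : Int) else 0) + altCount salto (j + 1) t

def es_par_alt (lista : List String) (salto : Int) : Bool :=
  PySem.Int.mod (altCount salto 0 lista) 2 == 0

-- ===== PRECONDITION & SPEC =====
-- Pre_ excludes salto ≤ 0 with a nonempty list: there A's while-loop never shrinks the list and
-- diverges (and B's modulus 2*salto would be 0 or negative); A returns on exactly this Pre_.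
def Pre_es_par (lista : List String) (salto : Int) : Prop := 1 ≤ salto ∨ lista = []
instance (lista : List String) (salto : Int) : Decidable (Pre_es_par lista salto) := by
  unfold Pre_es_par; infer_instance

def pvWitness_es_par : List String × Int := (["1", "0", "1"], 1)

def Spec_es_par (lista : List String) (salto : Int) (out : Bool) : Prop := out = es_par_alt lista salto
instance (lista : List String) (salto : Int) (out : Bool) : Decidable (Spec_es_par lista salto out) := by
  unfold Spec_es_par; infer_instance

-- ===== CLAIM (what is proved, stated in full; the proofs are below) =====
def Claim_equal_es_par : Prop := ∀ (lista : List String) (salto : Int), Dom_es_par lista salto → Pre_es_par lista salto → Spec_es_par lista salto (es_par lista salto)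

-- ===== LEMMAS AND PROOFS =====

-- Int count of "1"s in a list
def oneCnt (l : List String) : Int := ((l.filter (fun i => i == "1")).length : Int)

-- reference function: count of "1"s at positions whose phase (mod 2*S) is < S, starting at phase r
def psi (S : Nat) (r : Nat) : List String → Int
  | [] => 0
  | x :: t => (if r < S then (if x = "1" then (1 : Int) else 0) else 0) + psi S ((r + 1) % (2 * S)) t

theorem oneCnt_cons (x : String) (t : List String) :
    oneCnt (x :: t) = (if x = "1" then (1 : Int) else 0) + oneCnt t := by
  simp [oneCnt, List.filter_cons]
  split_ifs with h1 h2 h2 <;> simp_all <;> omega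

theorem oneCnt_sum (l : List String) :
    ((l.filter (fun i => i == "1")).map (fun _ => (1 : Int))).sum = oneCnt l := by
  simp [oneCnt]

theorem psi_append (S : Nat) (hS : 0 < S) (u v : List String) (r : Nat) (hr : r < 2 * S) :
    psi S r (u ++ v) = psi S r u + psi S ((r + u.length) % (2 * S)) v := by
  induction u generalizing r with
  | nil => simp [psi, Nat.mod_eq_of_lt hr]
  | cons x t ih =>
      simp only [List.cons_append, psi, List.length_cons]
      have : ((r + 1) % (2 * S) + t.length) % (2 * S) = (r + (t.length + 1)) % (2 * S) := by
        rw [Nat.mod_add_mod]; ring_nf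
      rw [ih ((r + 1) % (2 * S)) (Nat.mod_lt _ (by omega)), this]; ring

theorem psi_all (S : Nat) (u : List String) (r : Nat) (h : r + u.length ≤ S) :
    psi S r u = oneCnt u := by
  induction u generalizing r with
  | nil => simp [psi, oneCnt]
  | cons x t ih =>
      have hr : r < S := by simp at h; omega
      have h1 : r + 1 < 2 * S := by omega
      simp only [psi, Nat.mod_eq_of_lt h1, if_pos hr, oneCnt_cons]
      rw [ih (r + 1) (by simp at h ⊢; omega)]

theorem psi_none (S : Nat) (u : List String) (r : Nat) (h1 : S ≤ r) (h2 : r + u.length ≤ 2 * S) :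
    psi S r u = 0 := by
  induction u generalizing r with
  | nil => simp [psi]
  | cons x t ih =>
      simp only [psi, if_neg (by omega : ¬ r < S), zero_add]
      cases t with
      | nil => simp [psi]
      | cons y t' =>
          have hlt : r + 1 < 2 * S := by simp at h2; omega
          rw [Nat.mod_eq_of_lt hlt]
          exact ih (r + 1) (by omega) (by simp at h2 ⊢; omega)

theorem psi_split (S : Nat) (hS : 1 ≤ S) (l : List String) :
    psi S 0 l = oneCnt (l.take S) + psi S 0 (l.drop (2 * S)) := by
  have h1 : l = l.take (2 * S) ++ l.drop (2 * S) := (List.take_append_drop _ _).symm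
  calc psi S 0 l = psi S 0 (l.take (2 * S) ++ l.drop (2 * S)) := by rw [← h1]
    _ = psi S 0 (l.take (2 * S)) + psi S ((0 + (l.take (2 * S)).length) % (2 * S)) (l.drop (2 * S)) :=
        psi_append S (by omega) _ _ 0 (by omega)
    _ = oneCnt (l.take S) + psi S 0 (l.drop (2 * S)) := by
        congr 1
        · -- front block of length ≤ 2S
          have h2 : l.take (2 * S) = l.take S ++ (l.drop S).take S := by
            rw [← List.take_add]
            congr 1; omega
          rw [h2, psi_append S (by omega) _ _ 0 (by omega), psi_all S _ 0 (by simp), zero_add]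
          have hz : psi S ((l.take S).length % (2 * S)) ((l.drop S).take S) = 0 := by
            by_cases hl : S ≤ l.length
            · have hlen : (l.take S).length = S := by simp; omega
              rw [hlen, Nat.mod_eq_of_lt (by omega)]
              exact psi_none S _ S le_rfl (by simp; omega)
            · have : (l.drop S).take S = [] := by
                have : l.drop S = [] := List.drop_eq_nil_of_le (by omega)
                simp [this]
              simp [this, psi]
          rw [hz, add_zero]
        · by_cases hl : 2 * S ≤ l.length
          · have : (l.take (2 * S)).length = 2 * S := by simp; omega
            rw [this, zero_add, Nat.mod_self]
          · have hd : l.drop (2 * S) = [] := List.drop_eq_nil_of_le (by omega)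
            rw [hd]; simp [psi]

theorem slice_shrink (salto : Int) (hs : 1 ≤ salto) (l : List String) (h0 : 0 < l.length) :
    (PySem.List.slice l (some (salto * 2)) none).length < l.length := by
  rw [PySem.List.slice_from l (by omega : (0:Int) ≤ salto * 2)]
  have : 1 ≤ (salto * 2).toNat := by omega
  simp only [List.length_drop]; omega

theorem loop_append (salto : Int) (hs : 1 ≤ salto) (l acc : List String) :
    esParLoop salto l acc = acc ++ esParLoop salto l [] := by
  generalize hn : l.length = n
  induction n using Nat.strong_induction_on generalizing l acc with
  | _ n ih =>
    rw [esParLoop, esParLoop]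
    by_cases h0 : 0 < l.length
    · have hlt := slice_shrink salto hs l h0
      simp only [if_pos h0, dif_pos hlt]
      rw [ih _ (hn ▸ hlt) _ _ rfl, ih _ (hn ▸ hlt) _ ([] ++ PySem.List.slice l none (some salto)) rfl]
      simp [List.append_assoc]
    · simp [if_neg h0]

theorem loop_len (salto : Int) (hs : 1 ≤ salto) (l acc : List String) :
    (esParLoop salto l acc).length ≤ acc.length + l.length := by
  generalize hn : l.length = n
  induction n using Nat.strong_induction_on generalizing l acc with
  | _ n ih =>
    rw [esParLoop]
    by_cases h0 : 0 < l.length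
    · have hlt := slice_shrink salto hs l h0
      simp only [if_pos h0, dif_pos hlt]
      have h2 := ih _ (hn ▸ hlt) (PySem.List.slice l (some (salto * 2)) none)
        (acc ++ PySem.List.slice l none (some salto)) rfl
      have h3 : (PySem.List.slice l none (some salto)).length
          + (PySem.List.slice l (some (salto * 2)) none).length ≤ l.length := by
        rw [PySem.List.slice_to l (by omega : (0:Int) ≤ salto),
            PySem.List.slice_from l (by omega : (0:Int) ≤ salto * 2)]
        simp only [List.length_take, List.length_drop]
        have h4 : salto.toNat ≤ (salto * 2).toNat := by omega
        omega
      simp only [List.length_append] at h2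
      omega
    · simp [if_neg h0]

theorem oneCnt_append (u v : List String) : oneCnt (u ++ v) = oneCnt u + oneCnt v := by
  simp [oneCnt]

theorem loop_psi (S : Nat) (hS : 1 ≤ S) (l : List String) :
    oneCnt (esParLoop (S : Int) l []) = psi S 0 l := by
  generalize hn : l.length = n
  induction n using Nat.strong_induction_on generalizing l with
  | _ n ih =>
    rw [esParLoop]
    by_cases h0 : 0 < l.length
    · have hs : 1 ≤ (S : Int) := by exact_mod_cast hS
      have hlt := slice_shrink (S : Int) hs l h0
      simp only [if_pos h0, dif_pos hlt]
      rw [loop_append _ hs, oneCnt_append]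
      have e1 : PySem.List.slice l none (some (S : Int)) = l.take S := PySem.List.slice_to_natCast l S
      have e2 : PySem.List.slice l (some ((S : Int) * 2)) none = l.drop (2 * S) := by
        rw [show (S : Int) * 2 = ((2 * S : Nat) : Int) by push_cast; ring,
            PySem.List.slice_from_natCast]
      rw [e2] at hlt ⊢
      rw [ih _ (hn ▸ hlt) _ rfl, e1, List.nil_append]
      exact (psi_split S hS l).symm
    · have : l = [] := List.length_eq_zero_iff.mp (by omega)
      subst this
      simp [oneCnt, psi]

theorem mod_succ_phase (S m : Nat) : (m % (2 * S) + 1) % (2 * S) = (m + 1) % (2 * S) :=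
  Nat.mod_add_mod m (2 * S) 1

theorem altB1 (S : Nat) (hS : 1 ≤ S) (l : List String) (m : Nat) :
    altCount (S : Int) ((S : Int) - 1 + m) l = psi S (m % (2 * S)) l := by
  induction l generalizing m with
  | nil => simp [altCount, psi]
  | cons x t ih =>
      simp only [altCount, psi]
      have ht : altCount (S : Int) ((S : Int) - 1 + (m : Int) + 1) t
          = psi S ((m % (2 * S) + 1) % (2 * S)) t := by
        rw [show (S : Int) - 1 + (m : Int) + 1 = (S : Int) - 1 + ((m + 1 : Nat) : Int) by
              push_cast; ring,
            ih (m + 1), mod_succ_phase]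
      rw [ht]
      congr 1
      rw [show (S : Int) - 1 + (m : Int) - ((S : Int) - 1) = ((m : Nat) : Int) by ring,
          show 2 * (S : Int) = ((2 * S : Nat) : Int) by push_cast; ring,
          PySem.Int.mod_natCast]
      have hj : (S : Int) - 1 ≤ (S : Int) - 1 + (m : Int) := by omega
      have hmi : ((m : Int) % (2 * (S : Int)) < (S : Int)) ↔ (m % (2 * S) < S) := by
        constructor <;> intro h <;> exact_mod_cast h
      by_cases hm : m % (2 * S) < S <;> by_cases hx : x = "1" <;>
        simp [hm, hx, hj, hmi]

theorem altB0 (S : Nat) (hS : 1 ≤ S) (l : List String) (k : Nat) (hk : k < S) :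
    altCount (S : Int) ((S : Int) - 1 - k) l = psi S 0 (l.drop k) := by
  induction l generalizing k with
  | nil => simp [altCount, psi]
  | cons x t ih =>
      cases k with
      | zero =>
          have := altB1 S hS (x :: t) 0
          simpa using this
      | succ k' =>
          have hneg : ¬ ((S : Int) - 1 ≤ (S : Int) - 1 - ((k' + 1 : Nat) : Int)) := by
            push_cast; omega
          have hcond : ¬ ((S : Int) - 1 ≤ (S : Int) - 1 - ((k' + 1 : Nat) : Int) ∧
              PySem.Int.mod ((S : Int) - 1 - ((k' + 1 : Nat) : Int) - ((S : Int) - 1))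
                (2 * (S : Int)) < (S : Int) ∧ x = "1") := fun h => hneg h.1
          simp only [altCount, if_neg hcond, zero_add, List.drop_succ_cons]
          rw [show (S : Int) - 1 - ((k' + 1 : Nat) : Int) + 1 = (S : Int) - 1 - (k' : Int) by
                push_cast; ring]
          exact ih k' (by omega)

-- ===== VERDICT (by name: the statement is the Claim_ definition above) =====
theorem es_par_spec : Claim_equal_es_par := by
  intro lista salto _ hpre
  unfold Spec_es_par
  by_cases hs : 1 ≤ salto
  · obtain ⟨S, rfl⟩ : ∃ S : Nat, salto = (S : Int) :=
      ⟨salto.toNat, (Int.toNat_of_nonneg (by omega)).symm⟩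
    have hS : 1 ≤ S := by exact_mod_cast hs
    unfold es_par es_par_alt
    have e0 : PySem.List.slice lista (some ((S : Int) - 1)) none = lista.drop (S - 1) := by
      rw [show (S : Int) - 1 = ((S - 1 : Nat) : Int) by omega, PySem.List.slice_from_natCast]
    have hlen : (esParLoop (S : Int) (lista.drop (S - 1)) []).length ≤ lista.length := by
      have h1 := loop_len (S : Int) (by exact_mod_cast hS) (lista.drop (S - 1)) []
      simp only [List.length_nil, List.length_drop, zero_add] at h1
      omega
    have e1 : PySem.List.slice (esParLoop (S : Int) (lista.drop (S - 1)) []) none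
        (some ((lista.length : Nat) : Int)) = esParLoop (S : Int) (lista.drop (S - 1)) [] := by
      rw [PySem.List.slice_to_natCast, List.take_of_length_le hlen]
    have e3 : altCount (S : Int) 0 lista = psi S 0 (lista.drop (S - 1)) := by
      have h2 := altB0 S hS lista (S - 1) (by omega)
      rwa [show (S : Int) - 1 - ((S - 1 : Nat) : Int) = 0 by omega] at h2
    simp only [e0, e1, e3, oneCnt_sum, loop_psi S hS]
  · have hl : lista = [] := hpre.resolve_left hs
    subst hl
    unfold es_par es_par_alt
    have h1 : PySem.List.slice ([] : List String) (some (salto - 1)) none = [] := by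
      simp [PySem.List.slice]
    simp only [h1]
    rw [esParLoop]
    simp [altCount, PySem.List.slice, oneCnt, PySem.Int.mod]
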